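-- pv_equiv track=rewrite | github.com/fmorenovr/ComputerScience_UNI | CM334-Analisis_Numerico_I/computerAritm/auxFuncBinary.py | agregarZerosLeft
-- ===== SOURCE A (Python) =====
-- def agregarZerosLeft(num,n):
--   bina=str(num)
--   i=len(bina)
--   m=len(bina)
--   while i<n:
--     bina = '0' + bina
--     i+=1
--   return bina
-- ===== SOURCE B (Python) =====
-- def agregarZerosLeft(num, n):
--     bina = str(num)
--     faltan = n - len(bina)
--     return '0' * faltan + bina
-- ===== Notes on version B (the rewrite author's own statement) =====
-- stated objective: faster
-- what changed: Replaces the one-character-at-a-time while-loop prepend with a closed-form construction: compute the deficit n - len(str(num)) once and build the pad with string repetition in a single concatenation.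
import Mathlib
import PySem

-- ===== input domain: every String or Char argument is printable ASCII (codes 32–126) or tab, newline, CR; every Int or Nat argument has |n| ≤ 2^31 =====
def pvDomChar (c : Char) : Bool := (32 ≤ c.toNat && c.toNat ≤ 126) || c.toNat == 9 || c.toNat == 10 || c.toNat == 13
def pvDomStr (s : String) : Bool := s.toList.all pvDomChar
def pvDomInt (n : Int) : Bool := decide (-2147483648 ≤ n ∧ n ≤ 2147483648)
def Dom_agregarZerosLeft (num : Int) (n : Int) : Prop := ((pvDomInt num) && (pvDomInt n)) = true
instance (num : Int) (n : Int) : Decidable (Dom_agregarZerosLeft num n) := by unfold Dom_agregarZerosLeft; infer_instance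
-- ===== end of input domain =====

-- B replaces A's one-char-at-a-time while-loop prepend by a closed-form pad:
-- '0' * (n - len(str(num))) + str(num). Return value proved equal everywhere.

-- ===== PORT A =====
-- while i < n: bina = '0' + bina; i += 1   (the unused local m is dropped; it never affects the result)
def agregarZerosLeftLoop (i n : Int) (bina : List Char) : List Char :=
  if i < n then agregarZerosLeftLoop (i + 1) n ('0' :: bina) else bina
termination_by (n - i).toNat
decreasing_by omega

def agregarZerosLeft (num : Int) (n : Int) : String :=
  let bina := PySem.Int.toChars num
  let i : Int := bina.length
  String.ofList (agregarZerosLeftLoop i n bina)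

-- ===== PORT B =====
def agregarZerosLeft_alt (num : Int) (n : Int) : String :=
  let bina := PySem.Int.toChars num
  let faltan : Int := n - bina.length
  String.ofList (List.replicate faltan.toNat '0' ++ bina)

-- ===== PRECONDITION & SPEC =====
def Spec_agregarZerosLeft (num : Int) (n : Int) (out : String) : Prop := out = agregarZerosLeft_alt num n
instance (num : Int) (n : Int) (out : String) : Decidable (Spec_agregarZerosLeft num n out) := by unfold Spec_agregarZerosLeft; infer_instance

-- ===== CLAIM (what is proved, stated in full; the proofs are below) =====
def Claim_equal_agregarZerosLeft : Prop := ∀ (num : Int) (n : Int), Dom_agregarZerosLeft num n → Spec_agregarZerosLeft num n (agregarZerosLeft num n)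

-- ===== LEMMAS AND PROOFS =====
theorem agregarZerosLeftLoop_eq (k : Nat) : ∀ (i n : Int) (bina : List Char),
    (n - i).toNat = k →
    agregarZerosLeftLoop i n bina = List.replicate k '0' ++ bina := by
  induction k with
  | zero =>
    intro i n bina hk
    rw [agregarZerosLeftLoop]
    simp only [List.replicate_zero, List.nil_append]
    rw [if_neg (by omega)]
  | succ k ih =>
    intro i n bina hk
    rw [agregarZerosLeftLoop, if_pos (by omega)]
    rw [ih (i + 1) n ('0' :: bina) (by omega)]
    rw [List.replicate_succ', List.append_assoc]
    rfl

-- ===== VERDICT (by name: the statement is the Claim_ definition above) =====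
theorem agregarZerosLeft_spec : Claim_equal_agregarZerosLeft := by
  intro num n _
  show _ = _
  simp only [agregarZerosLeft, agregarZerosLeft_alt]
  rw [agregarZerosLeftLoop_eq ((n - ((PySem.Int.toChars num).length : Int)).toNat) _ _ _ rfl]
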